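-- pv_equiv track=rewrite | github.com/ahm1844/citespine | src/api/routes_query.py | _find_highlights
-- ===== SOURCE A (Python) =====
-- from typing import List, Dict, Any
--
-- def _find_highlights(text: str, boost_terms: List[str]) -> List[Dict[str, int]]:
--     """Find highlight positions for boost terms in text"""
--     highlights = []
--     text_lower = text.lower()
--
--     for term in boost_terms:
--         term_lower = term.lower()
--         start = 0
--         while True:
--             pos = text_lower.find(term_lower, start)
--             if pos == -1:
--                 break
--             highlights.append({"start": pos, "end": pos + len(term)})
--             start = pos + 1
--
--     # Sort by start position and merge overlapping highlights
--     highlights.sort(key=lambda x: x["start"])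
--     merged = []
--     for h in highlights:
--         if merged and h["start"] <= merged[-1]["end"]:
--             merged[-1]["end"] = max(merged[-1]["end"], h["end"])
--         else:
--             merged.append(h)
--
--     return merged
-- ===== SOURCE B (Python) =====
-- from typing import List, Dict
--
-- def _find_highlights(text: str, boost_terms: List[str]) -> List[Dict[str, int]]:
--     """Position-major scan: walk the text once left to right, at each position
--     emit every term that matches there, and merge into the result on the fly
--     (the matches are generated already ordered by start, so no sort is needed)."""
--     text_lower = text.lower()
--     lowered = [t.lower() for t in boost_terms]
--     merged: List[Dict[str, int]] = []
--     for i in range(len(text) + 1):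
--         for term, term_lower in zip(boost_terms, lowered):
--             if text_lower.startswith(term_lower, i):
--                 end = i + len(term)
--                 if merged and i <= merged[-1]["end"]:
--                     if end > merged[-1]["end"]:
--                         merged[-1]["end"] = end
--                 else:
--                     merged.append({"start": i, "end": end})
--     return merged
-- ===== Notes on version B (the rewrite author's own statement) =====
-- stated objective: alternative
-- what changed: A runs a repeated-find loop per term, collects all intervals, then sorts them and merges in a second pass; B scans the text positions once left to right, emits every term match at each position (so matches come out already ordered by start) and merges into the result on the fly, with no sort and no find loop.
import Mathlib
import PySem

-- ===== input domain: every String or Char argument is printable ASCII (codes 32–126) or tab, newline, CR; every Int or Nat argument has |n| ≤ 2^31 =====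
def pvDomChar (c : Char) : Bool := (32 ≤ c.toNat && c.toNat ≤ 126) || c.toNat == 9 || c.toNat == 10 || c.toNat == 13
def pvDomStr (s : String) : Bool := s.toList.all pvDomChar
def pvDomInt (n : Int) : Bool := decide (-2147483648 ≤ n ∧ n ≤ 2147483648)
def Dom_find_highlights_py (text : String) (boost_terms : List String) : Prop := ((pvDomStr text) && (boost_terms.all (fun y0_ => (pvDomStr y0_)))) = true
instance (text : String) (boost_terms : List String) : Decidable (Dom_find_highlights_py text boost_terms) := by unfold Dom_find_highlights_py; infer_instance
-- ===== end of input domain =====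

-- B replaces A's per-term find-loop plus sort-and-merge by a single position-major
-- scan of the text that emits matches already ordered by start and merges on the fly
-- (objective: alternative algorithm, no sort).

-- the dict {"start": s, "end": e} (built by both Pythons at their append sites)
def pvMkDict (s e : Int) : PySem.Dict String Int :=
  (PySem.Dict.empty.insert "start" s).insert "end" e

-- ===== PORT A =====
-- A's inner `while True: pos = text_lower.find(term_lower, start) …` loop.
-- fuel bounds the loop (each iteration start strictly increases and find fails once
-- start exceeds len(text), so len(text)+2 steps always suffice — proved in pvFindAllA_eq).
def pvFindAllA (tl tlow : List Char) (tlen : Int) :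
    Nat → Int → List (PySem.Dict String Int) → List (PySem.Dict String Int)
  | 0, _, hs => hs
  | fuel+1, start, hs =>
    let pos := PySem.Chars.findFrom tl tlow start none
    if pos = -1 then hs
    else pvFindAllA tl tlow tlen fuel (pos + 1) (hs ++ [pvMkDict pos (pos + tlen)])

-- one step of A's merge loop; `merged` is kept REVERSED (head = Python's merged[-1],
-- which Python mutates in place); the caller reverses at the end.
def pvMergeStepA (merged : List (PySem.Dict String Int)) (h : PySem.Dict String Int) :
    List (PySem.Dict String Int) :=
  match merged with
  | [] => [h]
  | last :: rest =>
      if h.getD "start" 0 ≤ last.getD "end" 0 then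
        last.insert "end" (max (last.getD "end" 0) (h.getD "end" 0)) :: rest
      else h :: last :: rest

def find_highlights_py (text : String) (boost_terms : List String) : List (List (String × Int)) :=
  let text_lower := PySem.Chars.lower text.toList
  let highlights := boost_terms.foldl
    (fun hs term =>
      pvFindAllA text_lower (PySem.Chars.lower term.toList) (term.toList.length : Int)
        (text_lower.length + 2) 0 hs) []
  let sortedH := PySem.List.sorted highlights (fun h => h.getD "start" 0) false
  ((sortedH.foldl pvMergeStepA []).reverse).map PySem.Dict.items

-- ===== PORT B =====
-- one emission step of B's on-the-fly merge (B mutates merged[-1]["end"] only when the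
-- new end is larger, and builds the dict only when it appends); `merged` reversed as above.
def pvEmitB (merged : List (PySem.Dict String Int)) (s e : Int) : List (PySem.Dict String Int) :=
  match merged with
  | [] => [pvMkDict s e]
  | last :: rest =>
      if s ≤ last.getD "end" 0 then
        if last.getD "end" 0 < e then last.insert "end" e :: rest else last :: rest
      else pvMkDict s e :: last :: rest

-- Source B's `text_lower.startswith(term_lower, i)`: for 0 ≤ i ≤ len(text) (the only i the
-- range produces) this is exactly `startswith` of the i-th suffix.
def find_highlights_py_alt (text : String) (boost_terms : List String) : List (List (String × Int)) :=
  let text_lower := PySem.Chars.lower text.toList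
  let lowered := boost_terms.map (fun t => PySem.Chars.lower t.toList)
  let merged := (List.range (text.toList.length + 1)).foldl
    (fun merged i =>
      (boost_terms.zip lowered).foldl
        (fun merged p =>
          if PySem.Chars.startswith (text_lower.drop i) p.2 then
            pvEmitB merged (i : Int) ((i : Int) + (p.1.toList.length : Int))
          else merged) merged) []
  (merged.reverse).map PySem.Dict.items

-- ===== PRECONDITION & SPEC =====
def Spec_find_highlights_py (text : String) (boost_terms : List String) (out : List (List (String × Int))) : Prop := out = find_highlights_py_alt text boost_terms
instance (text : String) (boost_terms : List String) (out : List (List (String × Int))) : Decidable (Spec_find_highlights_py text boost_terms out) := by unfold Spec_find_highlights_py; infer_instance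

-- ===== CLAIM (what is proved, stated in full; the proofs are below) =====
def Claim_equal_find_highlights_py : Prop := ∀ (text : String) (boost_terms : List String), Dom_find_highlights_py text boost_terms → Spec_find_highlights_py text boost_terms (find_highlights_py text boost_terms)

-- ===== LEMMAS AND PROOFS =====

-- proof-side abbreviations
def pvKey (d : PySem.Dict String Int) : Int := d.getD "start" 0
def pvQ (tl tlow : List Char) (i : Nat) : Bool := PySem.Chars.startswith (tl.drop i) tlow
def pvF (t : String) (i : Nat) : PySem.Dict String Int :=
  pvMkDict (i : Int) ((i : Int) + (t.toList.length : Int))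
def pvShaped (d : PySem.Dict String Int) : Prop := ∃ s e, d = pvMkDict s e
def pvIns (x : PySem.Dict String Int) (acc : List (PySem.Dict String Int)) :
    List (PySem.Dict String Int) :=
  PySem.List.insertBy (fun a b => decide (pvKey a < pvKey b)) x acc

-- the list of match positions of q in [k, k+m)
def pvOcc (q : Nat → Bool) : Nat → Nat → List Nat
  | 0, _ => []
  | m+1, k => (if q k then [k] else []) ++ pvOcc q m (k+1)

theorem pvMk_start (s e : Int) : pvKey (pvMkDict s e) = s := rfl
theorem pvMk_getD_start (s e : Int) : (pvMkDict s e).getD "start" 0 = s := rfl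
theorem pvMk_end (s e : Int) : (pvMkDict s e).getD "end" 0 = e := rfl
theorem pvMk_insert_end (s e v : Int) : (pvMkDict s e).insert "end" v = pvMkDict s v := rfl

theorem pvOcc_mem (q : Nat → Bool) : ∀ (m k i : Nat),
    i ∈ pvOcc q m k ↔ (k ≤ i ∧ i < k + m ∧ q i = true) := by
  intro m
  induction m with
  | zero =>
    intro k i
    simp only [pvOcc, List.not_mem_nil, false_iff]
    rintro ⟨h1, h2, _⟩; omega
  | succ m ih =>
    intro k i
    by_cases hq : q k = true
    · simp only [pvOcc, hq, if_pos, List.mem_append, List.mem_singleton, ih]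
      constructor
      · rintro (rfl | ⟨h1, h2, h3⟩)
        · exact ⟨le_rfl, by omega, hq⟩
        · exact ⟨by omega, by omega, h3⟩
      · rintro ⟨h1, h2, h3⟩
        rcases Nat.eq_or_lt_of_le h1 with rfl | h
        · exact Or.inl rfl
        · exact Or.inr ⟨h, by omega, h3⟩
    · simp only [pvOcc, hq, if_neg, Bool.false_eq_true, not_false_iff, List.nil_append, ih]
      constructor
      · rintro ⟨h1, h2, h3⟩; exact ⟨by omega, by omega, h3⟩
      · rintro ⟨h1, h2, h3⟩
        have hik : i ≠ k := by rintro rfl; rw [h3] at hq; exact hq rfl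
        exact ⟨by omega, by omega, h3⟩


theorem pvOcc_nodup (q : Nat → Bool) (m k : Nat) : (pvOcc q m k).Nodup := by
  induction m generalizing k with
  | zero => simp [pvOcc]
  | succ m ih =>
    by_cases hq : q k = true
    · simp only [pvOcc, hq, if_pos, List.singleton_append, List.nodup_cons]
      refine ⟨fun hmem => ?_, ih (k+1)⟩
      have := (pvOcc_mem q m (k+1) k).mp hmem
      omega
    · simp only [pvOcc, hq, if_neg, Bool.false_eq_true, not_false_iff, List.nil_append]
      exact ih (k+1)

theorem pvOcc_skip (q : Nat → Bool) : ∀ (j m k : Nat),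
    (∀ i, k ≤ i → i < k + j → q i = false) →
    pvOcc q (j + m) k = pvOcc q m (k + j) := by
  intro j
  induction j with
  | zero => intro m k _; rw [Nat.zero_add, Nat.add_zero]
  | succ j ih =>
    intro m k h
    have hk : q k = false := h k le_rfl (by omega)
    have : j + 1 + m = (j + m) + 1 := by omega
    rw [this]
    show (if q k then [k] else []) ++ pvOcc q (j + m) (k+1) = pvOcc q m (k + (j+1))
    rw [hk]
    simp only [Bool.false_eq_true, if_false, List.nil_append]
    have := ih m (k+1) (fun i h1 h2 => h i (by omega) (by omega))
    rw [this]
    have e : k + 1 + j = k + (j + 1) := by omega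
    rw [e]

theorem pvOcc_nil (q : Nat → Bool) (m k : Nat)
    (h : ∀ i, k ≤ i → i < k + m → q i = false) : pvOcc q m k = [] := by
  have := pvOcc_skip q m 0 k h
  simpa using this

theorem pvFindFrom_gt (tl sub : List Char) (k : Nat) (h : tl.length < k) :
    PySem.Chars.findFrom tl sub (k : Int) none = -1 := by
  unfold PySem.Chars.findFrom
  have h1 : ¬ ((k : Int) < 0) := by omega
  simp only [h1, if_false]
  have h2 : (tl.length : Int) < (k : Int) := by exact_mod_cast h
  rw [if_pos h2]

-- no match at or after position k means no match positions in [k, ...)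
theorem pvQ_false_of_not_infix (tl tlow : List Char) (k : Nat)
    (hni : ¬ tlow <:+: tl.drop k) :
    ∀ i, k ≤ i → pvQ tl tlow i = false := by
  intro i hki
  by_contra hne
  have hq : pvQ tl tlow i = true := by
    cases h : pvQ tl tlow i with
    | false => exact absurd h hne
    | true => rfl
  have hpre : tlow <+: tl.drop i := (PySem.Chars.startswith_iff _ _).mp hq
  apply hni
  have hdd : (tl.drop k).drop (i - k) = tl.drop i := by
    rw [List.drop_drop]
    congr 1
    omega
  have : ∃ j, tlow <+: (tl.drop k).drop j := ⟨i - k, by rw [hdd]; exact hpre⟩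
  exact (PySem.Chars.isIn_iff_infix _ _).mp
    ((PySem.Chars.exists_prefix_drop_iff_isIn _ _).mp this)

-- A's while-find loop collects exactly the match positions in order
theorem pvFindAllA_eq (tl tlow : List Char) (t : String) :
    ∀ (fuel k : Nat) (hs : List (PySem.Dict String Int)),
    tl.length + 1 ≤ fuel + k →
    pvFindAllA tl tlow (t.toList.length : Int) fuel (k : Int) hs
      = hs ++ (pvOcc (pvQ tl tlow) (tl.length + 1 - k) k).map (pvF t) := by
  intro fuel
  induction fuel with
  | zero =>
    intro k hs hb
    have h0 : tl.length + 1 - k = 0 := by omega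
    rw [h0]
    simp [pvFindAllA, pvOcc]
  | succ fuel ih =>
    intro k hs hb
    simp only [pvFindAllA]
    by_cases hk : k ≤ tl.length
    · rw [PySem.Chars.findFrom_natCast tl tlow k hk]
      by_cases hf : PySem.Chars.find (tl.drop k) tlow = -1
      · rw [if_pos hf, if_pos rfl]
        have hni : ¬ tlow <:+: tl.drop k := (PySem.Chars.find_eq_neg_one_iff _ _).mp hf
        rw [pvOcc_nil (pvQ tl tlow) _ k
          (fun i h1 _ => pvQ_false_of_not_infix tl tlow k hni i h1)]
        simp
      · rw [if_neg hf]
        have h0 : 0 ≤ PySem.Chars.find (tl.drop k) tlow := by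
          have := PySem.Chars.neg_one_le_find (tl.drop k) tlow
          rcases lt_or_eq_of_le this with h | h
          · omega
          · exact absurd h.symm hf
        set r := PySem.Chars.find (tl.drop k) tlow with hr
        have hrlen : r ≤ ((tl.drop k).length : Int) := PySem.Chars.find_le_length _ _
        have hdroplen : (tl.drop k).length = tl.length - k := by
          rw [List.length_drop]
        set p := k + r.toNat with hp
        have hpn : p ≤ tl.length := by omega
        have hpos : (k : Int) + r = (p : Int) := by
          rw [hp]
          push_cast [Int.toNat_of_nonneg h0]
          ring
        have hspec := PySem.Chars.find_spec (s := tl.drop k) (sub := tlow) h0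
        have hqp : pvQ tl tlow p = true := by
          apply (PySem.Chars.startswith_iff _ _).mpr
          have := hspec.1
          rw [List.drop_drop, ← hr] at this
          rwa [show k + r.toNat = p from hp.symm] at this
        have hqlt : ∀ i, k ≤ i → i < p → pvQ tl tlow i = false := by
          intro i h1 h2
          cases hqi : pvQ tl tlow i with
          | false => rfl
          | true =>
            exfalso
            have hpre : tlow <+: tl.drop i := (PySem.Chars.startswith_iff _ _).mp hqi
            have := hspec.2 (i - k) (show i - k < r.toNat by omega)
            rw [List.drop_drop, show k + (i - k) = i by omega] at this
            exact this hpre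
        have hne : ¬ ((k : Int) + r = -1) := by omega
        rw [if_neg hne]
        have harg : (k : Int) + r + 1 = ((p + 1 : Nat) : Int) := by
          rw [hpos]; push_cast; ring
        rw [harg, ih (p + 1) _ (by omega)]
        have hsplit : tl.length + 1 - k = (p - k) + (tl.length + 1 - p) := by omega
        rw [hsplit, pvOcc_skip (pvQ tl tlow) (p - k) (tl.length + 1 - p) k
          (fun i h1 h2 => hqlt i h1 (by omega)),
          show k + (p - k) = p by omega,
          show tl.length + 1 - p = (tl.length - p) + 1 by omega]
        show hs ++ [pvMkDict ((k:Int) + r) ((k:Int) + r + (t.toList.length : Int))] ++ _ = _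
        rw [pvOcc]
        rw [hqp]
        simp only [if_pos, List.singleton_append, List.map_cons]
        rw [show tl.length - p = tl.length + 1 - (p + 1) by omega]
        rw [hpos]
        simp [pvF, List.append_assoc]
    · rw [pvFindFrom_gt tl tlow k (by omega), if_pos rfl]
      rw [show tl.length + 1 - k = 0 by omega]
      simp [pvOcc]

-- ---- stability: stable sort of the row-major match list is the column-major list ----

theorem pvInsertBy_mid (bef : PySem.Dict String Int → PySem.Dict String Int → Bool)
    (x : PySem.Dict String Int) :
    ∀ (lo hi : List (PySem.Dict String Int)),
    (∀ y ∈ lo, bef x y = false) → (∀ y ∈ hi, bef x y = true) →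
    PySem.List.insertBy bef x (lo ++ hi) = lo ++ x :: hi := by
  intro lo
  induction lo with
  | nil =>
    intro hi _ hhi
    cases hi with
    | nil => simp [PySem.List.insertBy]
    | cons y ys =>
      rw [List.nil_append, PySem.List.insertBy, if_pos (hhi y List.mem_cons_self)]
      rfl
  | cons z lo ih =>
    intro hi hlo hhi
    have hz : bef x z = false := hlo z List.mem_cons_self
    rw [List.cons_append, PySem.List.insertBy, hz]
    simp only [Bool.false_eq_true, if_false]
    rw [ih hi (fun y hy => hlo y (List.mem_cons_of_mem z hy)) hhi, List.cons_append]

theorem pvFlatMap_congr {α β : Type} (l : List α) (F G : α → List β)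
    (h : ∀ a ∈ l, F a = G a) : l.flatMap F = l.flatMap G := by
  induction l with
  | nil => rfl
  | cons a l ih =>
    simp only [List.flatMap_cons]
    rw [h a List.mem_cons_self, ih (fun b hb => h b (List.mem_cons_of_mem a hb))]

theorem pvIns_one (N : Nat) (cols : Nat → List (PySem.Dict String Int)) (i : Nat)
    (hi : i ≤ N) (x : PySem.Dict String Int)
    (hcols : ∀ j, ∀ d ∈ cols j, pvKey d = (j : Int)) (hx : pvKey x = (i : Int)) :
    pvIns x ((List.range (N+1)).flatMap cols)
      = (List.range (N+1)).flatMap (fun j => if j = i then cols j ++ [x] else cols j) := by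
  have hsplit : List.range (N+1) = List.range (i+1) ++ (List.range (N - i)).map (fun u => (i+1) + u) := by
    rw [← List.range_add]; congr 1; omega
  rw [hsplit, List.flatMap_append, List.flatMap_append, pvIns]
  rw [pvInsertBy_mid _ x _ _ ?_ ?_]
  · rw [List.range_succ, List.flatMap_append, List.flatMap_append]
    rw [List.flatMap_map, List.flatMap_map]
    rw [pvFlatMap_congr (List.range i)
        (fun j => if j = i then cols j ++ [x] else cols j) cols
        (fun j hj => by
          have : j < i := List.mem_range.mp hj
          simp [Nat.ne_of_lt this])]
    rw [pvFlatMap_congr (List.range (N - i))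
        (fun a => if (i + 1 + a) = i then cols (i + 1 + a) ++ [x] else cols (i + 1 + a))
        (fun a => cols (i + 1 + a))
        (fun a _ => by simp [show ¬ (i + 1 + a = i) by omega])]
    simp [List.append_assoc]
  · intro y hy
    rcases List.mem_flatMap.mp hy with ⟨j, hj, hyj⟩
    have hkey : pvKey y = (j : Int) := hcols j y hyj
    have hjle : j ≤ i := by
      have := List.mem_range.mp hj; omega
    simp only [decide_eq_false_iff_not, hx, hkey, not_lt]
    exact_mod_cast hjle
  · intro y hy
    rcases List.mem_flatMap.mp hy with ⟨j, hj, hyj⟩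
    rcases List.mem_map.mp hj with ⟨u, _, rfl⟩
    have hkey : pvKey y = ((i + 1 + u : Nat) : Int) := hcols _ y hyj
    simp only [decide_eq_true_eq, hx, hkey]
    exact_mod_cast (by omega : i < i + 1 + u)

theorem pvIns_cols (N : Nat) (f : Nat → PySem.Dict String Int)
    (hf : ∀ i, pvKey (f i) = (i : Int)) :
    ∀ (S : List Nat) (cols : Nat → List (PySem.Dict String Int)),
    (∀ j, ∀ d ∈ cols j, pvKey d = (j : Int)) → (∀ i ∈ S, i ≤ N) → S.Nodup →
    (S.map f).foldl (fun acc x => pvIns x acc) ((List.range (N+1)).flatMap cols)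
      = (List.range (N+1)).flatMap (fun j => cols j ++ if j ∈ S then [f j] else []) := by
  intro S
  induction S with
  | nil =>
    intro cols hcols _ _
    simp only [List.map_nil, List.foldl_nil, List.not_mem_nil, if_false]
    exact (pvFlatMap_congr _ _ _ (fun j _ => by simp)).symm
  | cons i S ih =>
    intro cols hcols hS hnd
    simp only [List.map_cons, List.foldl_cons]
    rw [pvIns_one N cols i (hS i List.mem_cons_self) (f i) hcols (hf i)]
    rw [ih (fun j => if j = i then cols j ++ [f i] else cols j)
      (fun j d hd => by
        beta_reduce at hd
        by_cases hji : j = i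
        · subst hji
          rw [if_pos rfl] at hd
          rcases List.mem_append.mp hd with hd | hd
          · exact hcols j d hd
          · rw [List.mem_singleton] at hd
            subst hd
            exact hf j
        · rw [if_neg hji] at hd
          exact hcols j d hd)
      (fun i' hi' => hS i' (List.mem_cons_of_mem i hi'))
      (List.Nodup.of_cons hnd)]
    apply pvFlatMap_congr
    intro j _
    by_cases hji : j = i
    · subst hji
      have hjS : j ∉ S := (List.nodup_cons.mp hnd).1
      simp [hjS]
    · simp [hji, List.mem_cons]

def pvRow (tl : List Char) (N : Nat) (t : String) : List (PySem.Dict String Int) :=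
  (pvOcc (pvQ tl (PySem.Chars.lower t.toList)) (N+1) 0).map (pvF t)

def pvCol (tl : List Char) (ts : List String) (j : Nat) : List (PySem.Dict String Int) :=
  ts.filterMap (fun t => if pvQ tl (PySem.Chars.lower t.toList) j then some (pvF t j) else none)

theorem pvStable (tl : List Char) (N : Nat) :
    ∀ (ts : List String),
    PySem.List.sorted (ts.flatMap (pvRow tl N)) pvKey false
      = (List.range (N+1)).flatMap (pvCol tl ts) := by
  intro ts
  induction ts using List.reverseRecOn with
  | nil =>
    rw [List.flatMap_nil, PySem.List.sorted_eq_foldl_insertBy, List.foldl_nil]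
    symm
    rw [List.flatMap_eq_nil_iff]
    intro j _
    rfl
  | append_singleton ts t ih =>
    rw [List.flatMap_append, PySem.List.sorted_eq_foldl_insertBy, List.foldl_append,
        ← PySem.List.sorted_eq_foldl_insertBy, ih]
    simp only [List.flatMap_cons, List.flatMap_nil, List.append_nil, pvRow]
    rw [show (fun (acc : List (PySem.Dict String Int)) x =>
          PySem.List.insertBy (fun a b => decide (pvKey a < pvKey b)) x acc)
        = (fun acc x => pvIns x acc) from rfl]
    rw [pvIns_cols N (pvF t) (fun i => pvMk_start _ _)
      (pvOcc (pvQ tl (PySem.Chars.lower t.toList)) (N+1) 0) (pvCol tl ts)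
      (fun j d hd => by
        rcases List.mem_filterMap.mp hd with ⟨t', _, ht'⟩
        by_cases hq : pvQ tl (PySem.Chars.lower t'.toList) j
        · rw [if_pos hq] at ht'
          cases ht'
          exact pvMk_start _ _
        · rw [if_neg hq] at ht'; cases ht')
      (fun i hi => by
        have := (pvOcc_mem _ _ _ _).mp hi
        omega)
      (pvOcc_nodup _ _ _)]
    apply pvFlatMap_congr
    intro j hj
    have hjN : j < N + 1 := List.mem_range.mp hj
    have hmem : j ∈ pvOcc (pvQ tl (PySem.Chars.lower t.toList)) (N+1) 0
        ↔ pvQ tl (PySem.Chars.lower t.toList) j = true := by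
      rw [pvOcc_mem]
      constructor
      · rintro ⟨_, _, h3⟩; exact h3
      · intro h; exact ⟨Nat.zero_le j, by omega, h⟩
    conv_rhs => rw [pvCol, List.filterMap_append]
    congr 1
    by_cases hq : pvQ tl (PySem.Chars.lower t.toList) j = true
    · rw [if_pos (hmem.mpr hq)]
      simp [hq]
    · rw [if_neg (fun h => hq (hmem.mp h))]
      simp [hq]

-- ---- merge equivalence: B's emit equals A's merge step on shaped dicts ----

theorem pvEmit_eq_step (merged : List (PySem.Dict String Int)) (s e : Int)
    (h : ∀ d ∈ merged, pvShaped d) :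
    pvEmitB merged s e = pvMergeStepA merged (pvMkDict s e) := by
  cases merged with
  | nil => rfl
  | cons last rest =>
    obtain ⟨a, b, rfl⟩ := h _ List.mem_cons_self
    simp only [pvEmitB, pvMergeStepA, pvMk_getD_start, pvMk_end]
    by_cases h1 : s ≤ b
    · rw [if_pos h1, if_pos h1]
      by_cases h2 : b < e
      · rw [if_pos h2, max_eq_right (le_of_lt h2)]
      · rw [if_neg h2, max_eq_left (not_lt.mp h2), pvMk_insert_end]
    · rw [if_neg h1, if_neg h1]

theorem pvStep_shaped (merged : List (PySem.Dict String Int)) (s e : Int)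
    (h : ∀ d ∈ merged, pvShaped d) :
    ∀ d ∈ pvMergeStepA merged (pvMkDict s e), pvShaped d := by
  intro d hd
  cases merged with
  | nil =>
    simp only [pvMergeStepA, List.mem_singleton] at hd
    exact ⟨s, e, hd⟩
  | cons last rest =>
    obtain ⟨a, b, rfl⟩ := h _ List.mem_cons_self
    simp only [pvMergeStepA, pvMk_getD_start, pvMk_end] at hd
    by_cases h1 : s ≤ b
    · rw [if_pos h1] at hd
      rcases List.mem_cons.mp hd with rfl | hd
      · exact ⟨a, max b e, pvMk_insert_end a b _⟩
      · exact h d (List.mem_cons_of_mem _ hd)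
    · rw [if_neg h1] at hd
      rcases List.mem_cons.mp hd with rfl | hd
      · exact ⟨s, e, rfl⟩
      · exact h d hd

-- one column of B's scan equals folding A's merge step over that column
theorem pvInner (tl : List Char) (i : Nat) :
    ∀ (ts : List String) (m : List (PySem.Dict String Int)), (∀ d ∈ m, pvShaped d) →
    (ts.foldl (fun m t => if PySem.Chars.startswith (tl.drop i) (PySem.Chars.lower t.toList)
        then pvEmitB m (i : Int) ((i : Int) + (t.toList.length : Int)) else m) m
      = (pvCol tl ts i).foldl pvMergeStepA m)
    ∧ (∀ d ∈ (pvCol tl ts i).foldl pvMergeStepA m, pvShaped d) := by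
  intro ts
  induction ts with
  | nil => exact fun m hm => ⟨rfl, hm⟩
  | cons t ts ih =>
    intro m hm
    by_cases hq : PySem.Chars.startswith (tl.drop i) (PySem.Chars.lower t.toList) = true
    · have hcol : pvCol tl (t :: ts) i = pvF t i :: pvCol tl ts i := by
        simp [pvCol, pvQ, hq]
      have hm' : ∀ d ∈ pvMergeStepA m (pvF t i), pvShaped d := pvStep_shaped m _ _ hm
      constructor
      · rw [List.foldl_cons, if_pos hq, hcol, List.foldl_cons,
          pvEmit_eq_step m _ _ hm]
        exact (ih (pvMergeStepA m (pvF t i)) hm').1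
      · rw [hcol, List.foldl_cons]
        exact (ih (pvMergeStepA m (pvF t i)) hm').2
    · have hcol : pvCol tl (t :: ts) i = pvCol tl ts i := by
        simp [pvCol, pvQ, hq]
      rw [List.foldl_cons, if_neg hq, hcol]
      exact ih m hm

theorem pvNested (tl : List Char) (bts : List String) :
    ∀ (is : List Nat) (m : List (PySem.Dict String Int)), (∀ d ∈ m, pvShaped d) →
    is.foldl (fun m i => bts.foldl (fun m t =>
        if PySem.Chars.startswith (tl.drop i) (PySem.Chars.lower t.toList)
        then pvEmitB m (i : Int) ((i : Int) + (t.toList.length : Int)) else m) m) m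
    = is.foldl (fun m i => (pvCol tl bts i).foldl pvMergeStepA m) m := by
  intro is
  induction is with
  | nil => exact fun m _ => rfl
  | cons i is ih =>
    intro m hm
    simp only [List.foldl_cons]
    rw [(pvInner tl i bts m hm).1]
    exact ih _ (pvInner tl i bts m hm).2

theorem pvZipLower (g : String → List Char) :
    ∀ (l : List String), l.zip (l.map g) = l.map (fun t => (t, g t)) := by
  intro l
  induction l with
  | nil => rfl
  | cons t l ih => simp [ih]

-- ===== VERDICT (by name: the statement is the Claim_ definition above) =====
theorem find_highlights_py_spec : Claim_equal_find_highlights_py := by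
  intro text boost_terms _
  unfold Spec_find_highlights_py
  simp only [find_highlights_py, find_highlights_py_alt]
  have hlen : (PySem.Chars.lower text.toList).length = text.toList.length := by
    rw [PySem.Chars.lower, List.length_map]
  -- A's collect loop produces the row-major match list
  have hstep : (fun hs term => pvFindAllA (PySem.Chars.lower text.toList)
        (PySem.Chars.lower term.toList) (term.toList.length : Int)
        ((PySem.Chars.lower text.toList).length + 2) 0 hs)
      = (fun hs term => hs ++ pvRow (PySem.Chars.lower text.toList)
        (PySem.Chars.lower text.toList).length term) := by
    funext hs term
    have h0 := pvFindAllA_eq (PySem.Chars.lower text.toList)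
      (PySem.Chars.lower term.toList) term
      ((PySem.Chars.lower text.toList).length + 2) 0 hs (by omega)
    simpa [pvRow] using h0
  rw [hstep, PySem.List.foldl_append_eq_flatMap, List.nil_append]
  rw [show (fun h : PySem.Dict String Int => h.getD "start" 0) = pvKey from rfl]
  rw [pvStable (PySem.Chars.lower text.toList) (PySem.Chars.lower text.toList).length
    boost_terms]
  -- B's nested scan equals folding A's merge step over the column-major list
  rw [← hlen, List.foldl_flatMap]
  have houter : (fun (merged : List (PySem.Dict String Int)) (i : Nat) =>
        (boost_terms.zip (boost_terms.map (fun t => PySem.Chars.lower t.toList))).foldl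
          (fun merged p =>
            if PySem.Chars.startswith ((PySem.Chars.lower text.toList).drop i) p.2
            then pvEmitB merged (i : Int) ((i : Int) + (p.1.toList.length : Int))
            else merged) merged)
      = (fun merged i => boost_terms.foldl (fun m t =>
          if PySem.Chars.startswith ((PySem.Chars.lower text.toList).drop i)
              (PySem.Chars.lower t.toList)
          then pvEmitB m (i : Int) ((i : Int) + (t.toList.length : Int)) else m) merged) := by
    funext merged i
    rw [pvZipLower (fun t => PySem.Chars.lower t.toList) boost_terms, List.foldl_map]
  rw [houter]
  rw [pvNested (PySem.Chars.lower text.toList) boost_terms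
    (List.range ((PySem.Chars.lower text.toList).length + 1)) [] (by simp)]
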